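-- pv_equiv track=rewrite | github.com/srmarcballestero/IDG_HateXplain | src/utils/expl_utils.py | positional_encode_tokens
-- ===== SOURCE A (Python) =====
-- def positional_encode_tokens(
--     tokens: list[str],
-- ) -> list[str]:
--     """Encode tokens with positional information.
--
--     Args:
--         tokens: list[str] -- List of tokens.
--
--     Returns:
--         list[str] -- List of encoded tokens with positional information.
--
--     """
--     _token_dict = {}
--     _encoded = []
--
--     for token in tokens:
--         if token not in _token_dict:
--             _encoded.append(token)
--             _token_dict[token] = 1
--         else:
--             _encoded.append(f"{token}{_token_dict[token]}")
--             _token_dict[token] += 1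
--
--     return _encoded
-- ===== SOURCE B (Python) =====
-- def _enc(token, k):
--     return token if k == 0 else f"{token}{k}"
--
--
-- def positional_encode_tokens(
--     tokens: list[str],
-- ) -> list[str]:
--     """Encode tokens with positional information (group-and-scatter strategy).
--
--     Stage 1 groups the positions of each token; stage 2 scatters the encoded
--     occurrences into a preallocated output buffer by index.
--     """
--     groups = {}
--     for t, i in zip(tokens, range(len(tokens))):
--         groups[t] = groups.get(t, []) + [i]
--     out = [""] * len(tokens)
--     for t, idxs in groups.items():
--         for i, k in zip(idxs, range(len(idxs))):
--             out[i] = _enc(t, k)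
--     return out
-- ===== Notes on version B (the rewrite author's own statement) =====
-- stated objective: alternative
-- what changed: Replaces A's single left-to-right pass with a running occurrence dict by a two-stage group-and-scatter: first collect each distinct token's list of positions, then scatter the encoded occurrences into a preallocated output buffer by index.
import Mathlib
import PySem

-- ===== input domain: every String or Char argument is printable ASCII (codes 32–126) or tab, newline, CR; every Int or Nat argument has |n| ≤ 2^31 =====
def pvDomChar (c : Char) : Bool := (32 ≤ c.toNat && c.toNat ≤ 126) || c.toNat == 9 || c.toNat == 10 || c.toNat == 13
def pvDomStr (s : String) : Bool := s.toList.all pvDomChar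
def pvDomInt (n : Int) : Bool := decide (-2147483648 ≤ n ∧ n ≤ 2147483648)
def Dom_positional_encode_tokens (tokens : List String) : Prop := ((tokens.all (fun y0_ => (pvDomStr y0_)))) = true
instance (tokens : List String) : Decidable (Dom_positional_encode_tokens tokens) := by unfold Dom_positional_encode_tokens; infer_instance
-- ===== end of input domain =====

-- B replaces A's single running-count pass by a two-stage group-and-scatter: collect each
-- distinct token's positions, then write the encoded occurrences into a preallocated buffer
-- by index (alternative decomposition, not claimed faster).

-- ===== PORT A =====
def positional_encode_tokens (tokens : List String) : List String :=
  (tokens.foldl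
    (fun (st : PySem.Dict String Int × List String) token =>
      if st.1.contains token = false then
        (st.1.insert token 1, st.2 ++ [token])
      else
        (st.1.modify token 0 (· + 1), st.2 ++ [token ++ PySem.Int.toStr (st.1.getD token 0)]))
    (PySem.Dict.empty, [])).2

-- ===== PORT B =====
-- helper _enc of Source B
def pvEnc (token : String) (k : Nat) : String :=
  if k = 0 then token else token ++ PySem.Int.toStr (k : Int)

def positional_encode_tokens_alt (tokens : List String) : List String :=
  -- stage 1: per-token position lists; zip(tokens, range(len(tokens))) is zipIdx
  -- (all indices are nonnegative in-range positions, so Nat indices are exact)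
  let groups : PySem.Dict String (List Nat) :=
    tokens.zipIdx.foldl (fun d p => d.modify p.1 [] (fun x => x ++ [p.2])) PySem.Dict.empty
  -- stage 2: scatter the encoded occurrences into the preallocated buffer out
  groups.items.foldl
    (fun out tv =>
      tv.2.zipIdx.foldl (fun out p => out.set p.1 (pvEnc tv.1 p.2)) out)
    (List.replicate tokens.length "")

-- ===== PRECONDITION & SPEC =====
def Spec_positional_encode_tokens (tokens : List String) (out : List String) : Prop := out = positional_encode_tokens_alt tokens
instance (tokens : List String) (out : List String) : Decidable (Spec_positional_encode_tokens tokens out) := by unfold Spec_positional_encode_tokens; infer_instance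

-- ===== CLAIM (what is proved, stated in full; the proofs are below) =====
def Claim_equal_positional_encode_tokens : Prop := ∀ (tokens : List String), Dom_positional_encode_tokens tokens → Spec_positional_encode_tokens tokens (positional_encode_tokens tokens)

-- ===== LEMMAS AND PROOFS =====

/-- Reference form of A's loop: encode `rest` given the already-seen prefix `pre`. -/
def pvG (pre rest : List String) : List String :=
  match rest with
  | [] => []
  | t :: rs => pvEnc t (pre.count t) :: pvG (pre ++ [t]) rs

theorem pvA_loop (rest : List String) :
    ∀ (pre acc : List String) (d : PySem.Dict String Int),
      (∀ t, d.contains t = decide (0 < pre.count t)) →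
      (∀ t, 0 < pre.count t → d.getD t 0 = (pre.count t : Int)) →
      (rest.foldl
        (fun (st : PySem.Dict String Int × List String) token =>
          if st.1.contains token = false then
            (st.1.insert token 1, st.2 ++ [token])
          else
            (st.1.modify token 0 (· + 1), st.2 ++ [token ++ PySem.Int.toStr (st.1.getD token 0)]))
        (d, acc)).2 = acc ++ pvG pre rest := by
  induction rest with
  | nil => intro pre acc d _ _; simp [pvG]
  | cons t rs ih =>
    intro pre acc d hc hg
    simp only [List.foldl_cons]
    by_cases h0 : pre.count t = 0
    · have hct : d.contains t = false := by rw [hc]; simp [h0]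
      rw [pvG]
      simp only [hct, if_true]
      rw [ih (pre ++ [t]) (acc ++ [t]) (d.insert t 1) ?_ ?_]
      · simp [pvEnc, h0]
      · intro t'
        rw [PySem.Dict.contains_insert, hc]
        by_cases ht : t' = t
        · subst ht; simp [h0]
        · simp [ht, List.count_append]
      · intro t' hpos
        by_cases ht : t' = t
        · subst ht
          rw [PySem.Dict.getD_insert_self]
          simp [List.count_append, h0]
        · rw [PySem.Dict.getD_insert_of_ne _ _ _ ht]
          rw [List.count_append] at hpos ⊢
          have : [t].count t' = 0 := by simp [List.count_singleton]; exact fun h => ht h.symm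
          rw [this] at hpos ⊢
          simpa using hg t' (by simpa using hpos)
    · have hct : d.contains t = true := by rw [hc]; simp [Nat.pos_of_ne_zero h0]
      rw [pvG]
      simp only [hct, Bool.true_eq_false, if_false]
      rw [hg t (Nat.pos_of_ne_zero h0)]
      rw [ih (pre ++ [t]) _ (d.modify t 0 (· + 1)) ?_ ?_]
      · simp [pvEnc, h0]
      · intro t'
        rw [PySem.Dict.contains_modify, hc]
        by_cases ht : t' = t
        · subst ht; simp [Nat.pos_of_ne_zero h0]
        · simp [ht, List.count_append]
      · intro t' hpos
        by_cases ht : t' = t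
        · subst ht
          rw [PySem.Dict.getD_modify_self, hg _ (Nat.pos_of_ne_zero h0)]
          simp [List.count_append]
        · rw [PySem.Dict.getD_modify_of_ne _ _ _ ht]
          rw [List.count_append] at hpos ⊢
          have : [t].count t' = 0 := by simp [List.count_singleton]; exact fun h => ht h.symm
          rw [this] at hpos ⊢
          simpa using hg t' (by simpa using hpos)

theorem pvG_length (rest : List String) : ∀ pre, (pvG pre rest).length = rest.length := by
  induction rest with
  | nil => intro pre; simp [pvG]
  | cons t rs ih => intro pre; simp [pvG, ih]

theorem pvG_getElem? (rest : List String) :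
    ∀ pre (j : Nat) (hj : j < rest.length),
      (pvG pre rest)[j]? = some (pvEnc rest[j] ((pre ++ rest.take j).count rest[j])) := by
  induction rest with
  | nil => intro pre j hj; simp at hj
  | cons t rs ih =>
    intro pre j hj
    cases j with
    | zero => simp [pvG]
    | succ j =>
      have hj' : j < rs.length := by simpa using hj
      rw [pvG]
      simp only [List.getElem?_cons_succ, List.getElem_cons_succ, List.take_succ_cons]
      rw [ih (pre ++ [t]) j hj']
      simp

/-- Positions of token `t` in `xs`, offset by `k` (the per-token group of B). -/
def pvOccA (t : String) (xs : List String) (k : Nat) : List Nat :=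
  ((xs.zipIdx k).filter (fun p => p.1 == t)).map (·.2)

theorem pvOccA_cons (t x : String) (xs : List String) (k : Nat) :
    pvOccA t (x :: xs) k = if x = t then k :: pvOccA t xs (k + 1) else pvOccA t xs (k + 1) := by
  simp only [pvOccA, List.zipIdx_cons, List.filter_cons]
  by_cases h : x = t <;> simp [h]

theorem pvOccA_lb (t : String) (xs : List String) :
    ∀ (k i : Nat), i ∈ pvOccA t xs k → k ≤ i := by
  induction xs with
  | nil => intro k i h; simp [pvOccA] at h
  | cons x xs ih =>
    intro k i h
    rw [pvOccA_cons] at h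
    by_cases hx : x = t
    · simp [hx] at h
      rcases h with h | h
      · omega
      · have := ih (k + 1) i h; omega
    · simp [hx] at h
      have := ih (k + 1) i h; omega

theorem pvOccA_nodup (t : String) (xs : List String) : ∀ k, (pvOccA t xs k).Nodup := by
  induction xs with
  | nil => intro k; simp [pvOccA]
  | cons x xs ih =>
    intro k
    rw [pvOccA_cons]
    by_cases hx : x = t
    · simp only [hx, if_true]
      refine List.nodup_cons.mpr ⟨?_, ih (k + 1)⟩
      intro hmem
      have := pvOccA_lb t xs (k + 1) k hmem; omega
    · simpa [hx] using ih (k + 1)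

theorem pvOccA_sound (t : String) (xs : List String) :
    ∀ (k i : Nat), i ∈ pvOccA t xs k → ∃ d, i = k + d ∧ ∃ hd : d < xs.length, xs[d] = t := by
  induction xs with
  | nil => intro k i h; simp [pvOccA] at h
  | cons x xs ih =>
    intro k i h
    rw [pvOccA_cons] at h
    by_cases hx : x = t
    · simp [hx] at h
      rcases h with h | h
      · exact ⟨0, by omega, by simp, by simpa using hx⟩
      · obtain ⟨d, hd1, hd2, hd3⟩ := ih (k + 1) i h
        exact ⟨d + 1, by omega, by simpa using hd2, by simpa using hd3⟩
    · simp [hx] at h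
      obtain ⟨d, hd1, hd2, hd3⟩ := ih (k + 1) i h
      exact ⟨d + 1, by omega, by simpa using hd2, by simpa using hd3⟩

theorem pvOccA_kth (t : String) (xs : List String) :
    ∀ (k j i : Nat), (pvOccA t xs k)[j]? = some i →
      ∃ d, i = k + d ∧ ∃ hd : d < xs.length,
        xs[d] = t ∧ (xs.take d).count t = j := by
  induction xs with
  | nil => intro k j i h; simp [pvOccA] at h
  | cons x xs ih =>
    intro k j i h
    rw [pvOccA_cons] at h
    by_cases hx : x = t
    · simp only [hx, if_true] at h
      cases j with
      | zero =>
        simp at h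
        exact ⟨0, by omega, by simp, by simpa using hx, by simp⟩
      | succ j =>
        rw [List.getElem?_cons_succ] at h
        obtain ⟨d, hd1, hd2, hd3, hd4⟩ := ih (k + 1) j i h
        refine ⟨d + 1, by omega, by simpa using hd2, by simpa using hd3, ?_⟩
        subst hx
        simp [hd4]
    · simp only [hx, if_false] at h
      obtain ⟨d, hd1, hd2, hd3, hd4⟩ := ih (k + 1) j i h
      refine ⟨d + 1, by omega, by simpa using hd2, by simpa using hd3, ?_⟩
      have hxt : (x == t) = false := by simpa using hx
      simp [List.count_cons, hd4, hxt]

theorem pvOccA_complete (t : String) (xs : List String) :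
    ∀ (k d : Nat) (hd : d < xs.length), xs[d] = t → k + d ∈ pvOccA t xs k := by
  induction xs with
  | nil => intro k d hd; simp at hd
  | cons x xs ih =>
    intro k d hd hx
    rw [pvOccA_cons]
    cases d with
    | zero =>
      simp at hx
      simp [hx]
    | succ d =>
      have hd' : d < xs.length := by simpa using hd
      have hmem := ih (k + 1) d hd' (by simpa using hx)
      have heq : k + (d + 1) = (k + 1) + d := by omega
      by_cases hxt : x = t
      · simp only [hxt, if_true]
        exact List.mem_cons_of_mem _ (heq ▸ hmem)
      · simp only [hxt, if_false]
        exact heq ▸ hmem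

/-- B's inner scatter loop over one group's positions. -/
def pvScat (t : String) (l : List Nat) (k0 : Nat) (out : List String) : List String :=
  (l.zipIdx k0).foldl (fun out p => out.set p.1 (pvEnc t p.2)) out

theorem pvScat_length (t : String) (l : List Nat) :
    ∀ k0 out, (pvScat t l k0 out).length = out.length := by
  induction l with
  | nil => intro k0 out; simp [pvScat]
  | cons x xs ih =>
    intro k0 out
    simp only [pvScat, List.zipIdx_cons, List.foldl_cons]
    simpa [pvScat] using (ih (k0 + 1) (out.set x (pvEnc t k0))).trans (by simp)

theorem pvScat_not_mem (t : String) (l : List Nat) :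
    ∀ k0 out (i : Nat), i ∉ l → (pvScat t l k0 out)[i]? = out[i]? := by
  induction l with
  | nil => intro k0 out i _; simp [pvScat]
  | cons x xs ih =>
    intro k0 out i hi
    simp only [pvScat, List.zipIdx_cons, List.foldl_cons]
    have hix : x ≠ i := fun h => hi (h ▸ List.mem_cons_self)
    have : i ∉ xs := fun h => hi (List.mem_cons_of_mem _ h)
    rw [show ((xs.zipIdx (k0+1)).foldl (fun out p => out.set p.1 (pvEnc t p.2))
          (out.set x (pvEnc t k0))) = pvScat t xs (k0+1) (out.set x (pvEnc t k0)) from rfl]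
    rw [ih (k0 + 1) _ i this, List.getElem?_set_ne hix]

theorem pvScat_mem (t : String) (l : List Nat) :
    ∀ k0 out, l.Nodup → (∀ x ∈ l, x < out.length) →
      ∀ (j : Nat) (hj : j < l.length),
        (pvScat t l k0 out)[l[j]]? = some (pvEnc t (k0 + j)) := by
  induction l with
  | nil => intro k0 out _ _ j hj; simp at hj
  | cons x xs ih =>
    intro k0 out hnd hb j hj
    simp only [pvScat, List.zipIdx_cons, List.foldl_cons]
    rw [show ((xs.zipIdx (k0+1)).foldl (fun out p => out.set p.1 (pvEnc t p.2))
          (out.set x (pvEnc t k0))) = pvScat t xs (k0+1) (out.set x (pvEnc t k0)) from rfl]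
    obtain ⟨hx, hnd'⟩ := List.nodup_cons.mp hnd
    cases j with
    | zero =>
      simp only [List.getElem_cons_zero]
      rw [pvScat_not_mem t xs (k0+1) _ x hx,
        List.getElem?_set_self (by simpa using hb x List.mem_cons_self)]
      simp
    | succ j =>
      have hj' : j < xs.length := by simpa using hj
      have hb' : ∀ y ∈ xs, y < (out.set x (pvEnc t k0)).length := by
        intro y hy; simpa using hb y (List.mem_cons_of_mem _ hy)
      have := ih (k0 + 1) (out.set x (pvEnc t k0)) hnd' hb' j hj'
      simpa [Nat.add_assoc, Nat.add_comm 1 j] using this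

theorem pvScat_group (tokens : List String) (t : String) (out : List String)
    (hlen : out.length = tokens.length) (i : Nat) (hi : i < tokens.length) :
    (pvScat t (pvOccA t tokens 0) 0 out)[i]? =
      if tokens[i] = t then some (pvEnc t ((tokens.take i).count t)) else out[i]? := by
  by_cases h : tokens[i] = t
  · simp only [h, if_true]
    have hmem : i ∈ pvOccA t tokens 0 := by simpa using pvOccA_complete t tokens 0 i hi h
    obtain ⟨j, hj, hlj⟩ := List.mem_iff_getElem.mp hmem
    have hb : ∀ x ∈ pvOccA t tokens 0, x < out.length := by
      intro x hx
      obtain ⟨d, hd1, hd2, _⟩ := pvOccA_sound t tokens 0 x hx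
      omega
    have hset := pvScat_mem t (pvOccA t tokens 0) 0 out (pvOccA_nodup t tokens 0) hb j hj
    obtain ⟨d, hd1, hd2, _, hd4⟩ := pvOccA_kth t tokens 0 j i
      (by rw [List.getElem?_eq_getElem hj, hlj])
    have hdi : d = i := by omega
    subst hdi
    rw [hlj] at hset
    rw [hset, hd4]
    simp
  · simp only [h, if_false]
    apply pvScat_not_mem
    intro hmem
    obtain ⟨d, hd1, hd2, hd3⟩ := pvOccA_sound t tokens 0 i hmem
    have : d = i := by omega
    exact h (this ▸ hd3)

theorem pvScat_loop (tokens : List String) (ts : List String) :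
    ∀ (out : List String), out.length = tokens.length →
      (ts.foldl (fun out t => pvScat t (pvOccA t tokens 0) 0 out) out).length = tokens.length ∧
      ∀ (i : Nat) (hi : i < tokens.length),
        (ts.foldl (fun out t => pvScat t (pvOccA t tokens 0) 0 out) out)[i]? =
          if tokens[i] ∈ ts then some (pvEnc tokens[i] ((tokens.take i).count tokens[i]))
          else out[i]? := by
  induction ts with
  | nil => intro out hlen; exact ⟨hlen, by intro i hi; simp⟩
  | cons t ts ih =>
    intro out hlen
    simp only [List.foldl_cons]
    have hlen1 : (pvScat t (pvOccA t tokens 0) 0 out).length = tokens.length := by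
      rw [pvScat_length]; exact hlen
    obtain ⟨hL, hP⟩ := ih (pvScat t (pvOccA t tokens 0) 0 out) hlen1
    refine ⟨hL, ?_⟩
    intro i hi
    rw [hP i hi]
    by_cases hts : tokens[i] ∈ ts
    · simp [hts]
    · simp only [hts, if_false]
      rw [pvScat_group tokens t out hlen i hi]
      by_cases h : tokens[i] = t
      · simp [h, List.mem_cons]
      · simp [h, hts, List.mem_cons]

theorem pvB_items (tokens : List String) :
    (tokens.zipIdx.foldl (fun d p => d.modify p.1 [] (fun x => x ++ [p.2]))
        PySem.Dict.empty).items =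
      (PySem.Set.ofList tokens).map (fun t => (t, pvOccA t tokens 0)) := by
  have hkeys : (tokens.zipIdx.foldl (fun d p => d.modify p.1 [] (fun x => x ++ [p.2]))
      PySem.Dict.empty).keys = PySem.Set.ofList tokens := by
    rw [PySem.Dict.keys_foldl_modify_key tokens.zipIdx Prod.fst []
      (fun _ p => fun x => x ++ [p.2]) PySem.Dict.empty]
    simp [PySem.Set.update_nil_left, List.zipIdx_map_fst 0 tokens]
  have hnd : (tokens.zipIdx.foldl (fun d p => d.modify p.1 [] (fun x => x ++ [p.2]))
      PySem.Dict.empty).keys.Nodup := by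
    apply PySem.Dict.nodup_keys_foldl_modify_key tokens.zipIdx Prod.fst []
      (fun _ p => fun x => x ++ [p.2]) PySem.Dict.empty
    simp
  rw [PySem.Dict.items_eq_map_keys _ hnd [], hkeys]
  apply List.map_congr_left
  intro t _
  rw [PySem.Dict.getD_foldl_modify_append tokens.zipIdx PySem.Dict.empty t]
  simp [pvOccA]

theorem pvB_char (tokens : List String) :
    (positional_encode_tokens_alt tokens).length = tokens.length ∧
    ∀ (i : Nat) (hi : i < tokens.length),
      (positional_encode_tokens_alt tokens)[i]? =
        some (pvEnc tokens[i] ((tokens.take i).count tokens[i])) := by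
  have hdef : positional_encode_tokens_alt tokens =
      ((tokens.zipIdx.foldl (fun d p => d.modify p.1 [] (fun x => x ++ [p.2]))
          PySem.Dict.empty).items).foldl
        (fun out tv => tv.2.zipIdx.foldl (fun out p => out.set p.1 (pvEnc tv.1 p.2)) out)
        (List.replicate tokens.length "") := rfl
  rw [hdef, pvB_items tokens, List.foldl_map]
  have hbase : (List.replicate tokens.length (α := String) "").length = tokens.length := by simp
  obtain ⟨hL, hP⟩ := pvScat_loop tokens (PySem.Set.ofList tokens)
    (List.replicate tokens.length "") hbase
  refine ⟨hL, ?_⟩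
  intro i hi
  have hmem : tokens[i] ∈ PySem.Set.ofList tokens :=
    (PySem.Set.mem_ofList tokens _).mpr (List.getElem_mem hi)
  have h := hP i hi
  rw [if_pos hmem] at h
  exact h

-- ===== VERDICT (by name: the statement is the Claim_ definition above) =====
theorem positional_encode_tokens_spec : Claim_equal_positional_encode_tokens := by
  intro tokens _
  show positional_encode_tokens tokens = positional_encode_tokens_alt tokens
  have hA : positional_encode_tokens tokens = pvG [] tokens := by
    rw [positional_encode_tokens]
    simpa using pvA_loop tokens [] [] PySem.Dict.empty (by intro t; simp) (by intro t h; simp at h)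
  obtain ⟨hBlen, hBget⟩ := pvB_char tokens
  rw [hA]
  apply List.ext_getElem?
  intro i
  by_cases hi : i < tokens.length
  · rw [hBget i hi, List.getElem?_eq_getElem (by rw [pvG_length]; exact hi)]
    have := pvG_getElem? tokens [] i hi
    rw [List.getElem?_eq_getElem (by rw [pvG_length]; exact hi)] at this
    simpa using this
  · rw [List.getElem?_eq_none (by rw [pvG_length]; omega),
        List.getElem?_eq_none (by rw [hBlen]; omega)]
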